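-- pv_equiv track=rewrite | github.com/leegwae/problem-solving | implementation/HTML_파싱.py | remove_tag
-- ===== SOURCE A (Python) =====
-- def remove_tag(s: str) -> str:
-- 	removed = ''
--
-- 	tag = False
-- 	for ch in s:
-- 		if ch == '<':
-- 			tag = True
-- 			continue
-- 		if ch == '>':
-- 			tag = False
-- 			continue
-- 		if tag:
-- 			continue
--
-- 		removed += ch
--
-- 	return removed
-- ===== SOURCE B (Python) =====
-- def remove_tag(s: str) -> str:
--     pieces = []
--     i = 0
--     while True:
--         j = s.find('<', i)
--         if j == -1:
--             pieces.append(s[i:].replace('>', ''))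
--             break
--         pieces.append(s[i:j].replace('>', ''))
--         k = s.find('>', j + 1)
--         if k == -1:
--             break
--         i = k + 1
--     return ''.join(pieces)
-- ===== Notes on version B (the rewrite author's own statement) =====
-- stated objective: faster
-- what changed: Replaces the per-character boolean-flag loop with repeated string concatenation by a find-driven scan that jumps between '<' and '>' positions and copies whole '>'-stripped segments at once.
import Mathlib
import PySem

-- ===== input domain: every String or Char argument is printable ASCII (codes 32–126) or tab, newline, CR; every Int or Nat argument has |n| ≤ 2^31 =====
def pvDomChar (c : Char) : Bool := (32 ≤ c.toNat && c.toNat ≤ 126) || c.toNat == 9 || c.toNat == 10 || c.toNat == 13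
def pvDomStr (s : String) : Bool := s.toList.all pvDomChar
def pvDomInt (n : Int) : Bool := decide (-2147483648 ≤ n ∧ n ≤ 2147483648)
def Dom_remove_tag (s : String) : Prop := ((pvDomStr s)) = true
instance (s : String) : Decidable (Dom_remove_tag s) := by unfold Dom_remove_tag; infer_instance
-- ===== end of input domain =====

-- B replaces A's per-character flag loop with a find-driven scan that jumps between '<'/'>'
-- positions and copies whole '>'-stripped segments (objective: alternative; same return value).

-- ===== PORT A =====
-- literal port of A: fold over the characters with state (removed, tag)
def remove_tag (s : String) : String :=
  String.ofList (s.toList.foldl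
    (fun (st : List Char × Bool) ch =>
      if ch = '<' then (st.1, true)
      else if ch = '>' then (st.1, false)
      else if st.2 then st
      else (st.1 ++ [ch], st.2))
    ([], false)).1

-- ===== PORT B =====
-- each recursion step = one iteration of Source B's while loop: the segment up to the next '<'
-- (s.find('<', i) / s[i:j]) is copied with '>' removed; then we jump past the matching '>'
-- (s.find('>', j+1)) and continue from k+1.
def removeTagScan (xs : List Char) : List Char :=
    match h : xs.dropWhile (· ≠ '<') with
    | [] => (xs.takeWhile (· ≠ '<')).filter (· ≠ '>')
    | _ :: r =>
      (xs.takeWhile (· ≠ '<')).filter (· ≠ '>') ++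
      (match h2 : r.dropWhile (· ≠ '>') with
       | [] => []
       | _ :: r3 => removeTagScan r3)
termination_by xs.length
decreasing_by
  have hx := congrArg List.length h
  have hr := congrArg List.length h2
  have hx' := List.length_dropWhile_le (· ≠ '<') xs
  have hr' := List.length_dropWhile_le (· ≠ '>') r
  simp at hx hr hx' hr'
  show r3.length < xs.length
  omega

def remove_tag_alt (s : String) : String := String.ofList (removeTagScan s.toList)

-- ===== PRECONDITION & SPEC =====
def Spec_remove_tag (s : String) (out : String) : Prop := out = remove_tag_alt s
instance (s : String) (out : String) : Decidable (Spec_remove_tag s out) := by unfold Spec_remove_tag; infer_instance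

-- ===== CLAIM (what is proved, stated in full; the proofs are below) =====
def Claim_equal_remove_tag : Prop := ∀ (s : String), Dom_remove_tag s → Spec_remove_tag s (remove_tag s)

-- ===== LEMMAS AND PROOFS =====

-- reference function: what A's flag loop emits from a given tag state
def fA : Bool → List Char → List Char
  | _, [] => []
  | tag, c :: xs =>
    if c = '<' then fA true xs
    else if c = '>' then fA false xs
    else if tag then fA tag xs
    else c :: fA false xs

theorem foldl_fA (xs : List Char) : ∀ (acc : List Char) (tag : Bool),
    (xs.foldl
      (fun (st : List Char × Bool) ch =>
        if ch = '<' then (st.1, true)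
        else if ch = '>' then (st.1, false)
        else if st.2 then st
        else (st.1 ++ [ch], st.2))
      (acc, tag)).1 = acc ++ fA tag xs := by
  induction xs with
  | nil => intro acc tag; simp [fA]
  | cons c xs ih =>
    intro acc tag
    by_cases h1 : c = '<'
    · simp [h1, fA, ih]
    · by_cases h2 : c = '>'
      · simp [h1, h2, fA, ih]
      · cases tag with
        | true => simp [h2, fA, ih]
        | false => simp [h1, h2, fA, ih]

theorem fA_false_append (t : List Char) (rest : List Char) (ht : ∀ c ∈ t, c ≠ '<') :
    fA false (t ++ rest) = t.filter (· ≠ '>') ++ fA false rest := by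
  induction t with
  | nil => simp
  | cons c t ih =>
    have hc : c ≠ '<' := ht c (by simp)
    have ht' : ∀ x ∈ t, x ≠ '<' := fun x hx => ht x (by simp [hx])
    by_cases h2 : c = '>'
    · simp [fA, h2, ih ht']
    · simp [fA, hc, h2, ih ht']

theorem fA_true_eq (xs : List Char) :
    fA true xs = (match xs.dropWhile (· ≠ '>') with
                  | [] => []
                  | _ :: r => fA false r) := by
  induction xs with
  | nil => simp [fA]
  | cons c xs ih =>
    by_cases h2 : c = '>'
    · simp [fA, h2, List.dropWhile]
    · by_cases h1 : c = '<' <;> simp [fA, h1, h2, List.dropWhile, ih]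

theorem dropWhile_head_not {α : Type} {p : α → Bool} {xs : List α} {c : α} {r : List α}
    (h : xs.dropWhile p = c :: r) : p c = false := by
  induction xs with
  | nil => simp [List.dropWhile] at h
  | cons a t ih =>
    by_cases hp : p a
    · simp [List.dropWhile, hp] at h
      exact ih h
    · simp [List.dropWhile, hp] at h
      rw [← h.1]
      simpa using hp

theorem removeTagScan_eq_aux : ∀ (n : Nat) (xs : List Char), xs.length ≤ n →
    removeTagScan xs = fA false xs := by
  intro n
  induction n with
  | zero =>
    intro xs hxs
    have : xs = [] := by cases xs <;> simp_all
    subst this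
    rw [removeTagScan]
    simp [fA]
  | succ n ih =>
    intro xs hxs
    rw [removeTagScan]
    have htake : ∀ x ∈ xs.takeWhile (· ≠ '<'), x ≠ '<' := by
      intro x hx
      have := List.mem_takeWhile_imp hx
      simpa using this
    split
    · next h =>
      conv_rhs => rw [← List.takeWhile_append_dropWhile (p := (· ≠ '<')) (l := xs)]
      rw [h, fA_false_append _ _ htake]
      simp [fA]
    · next c r h =>
      conv_rhs => rw [← List.takeWhile_append_dropWhile (p := (· ≠ '<')) (l := xs)]
      rw [h, fA_false_append _ _ htake]
      have hc : c = '<' := by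
        have := dropWhile_head_not h
        simpa using this
      subst hc
      have hrlen : r.length ≤ n := by
        have e1 := congrArg List.length h
        have e2 := List.length_dropWhile_le (· ≠ '<') xs
        simp at e1 e2
        omega
      have hrhs : fA false ('<' :: r) = fA true r := by simp [fA]
      rw [hrhs, fA_true_eq r]
      split
      · next h2 => rw [h2]
      · next d r3 h2 =>
        have hlen3 : r3.length ≤ n := by
          have e1 := congrArg List.length h2
          have e2 := List.length_dropWhile_le (· ≠ '>') r
          simp at e1 e2
          omega
        rw [ih r3 hlen3, h2]

theorem removeTagScan_eq (xs : List Char) : removeTagScan xs = fA false xs :=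
  removeTagScan_eq_aux xs.length xs (le_refl _)

-- ===== VERDICT (by name: the statement is the Claim_ definition above) =====
theorem remove_tag_spec : Claim_equal_remove_tag := by
  intro s _
  unfold Spec_remove_tag remove_tag remove_tag_alt
  rw [removeTagScan_eq, foldl_fA]
  simp
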